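-- pv_equiv track=rewrite | github.com/sudoheader/100daysOfAlgorithms | longest-unique-sequence.py | longest_unique_sequence
-- ===== SOURCE A (Python) =====
-- def longest_unique_sequence(sequence):
--     i, j = 0, 0
--
--     while j < len(sequence):
--         if sequence[j] in sequence[i:j]:
--             i += 1
--         else:
--             j += 1
--             yield sequence[i:j]
-- ===== SOURCE B (Python) =====
-- def longest_unique_sequence(sequence):
--     # One pass with a last-occurrence index map: the window start jumps
--     # directly past the previous occurrence instead of rescanning slices.
--     last = {}
--     i = 0
--     for j, x in enumerate(sequence):
--         p = last.get(x, -1)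
--         if p >= i:
--             i = p + 1
--         last[x] = j
--         yield sequence[i:j + 1]
-- ===== Notes on version B (the rewrite author's own statement) =====
-- stated objective: faster
-- what changed: Replaces A's step-by-step window shrink with its O(n) slice membership scans by a single pass keeping a last-occurrence index dict, so the window start jumps directly past the previous occurrence with an O(1) lookup.
import Mathlib
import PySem

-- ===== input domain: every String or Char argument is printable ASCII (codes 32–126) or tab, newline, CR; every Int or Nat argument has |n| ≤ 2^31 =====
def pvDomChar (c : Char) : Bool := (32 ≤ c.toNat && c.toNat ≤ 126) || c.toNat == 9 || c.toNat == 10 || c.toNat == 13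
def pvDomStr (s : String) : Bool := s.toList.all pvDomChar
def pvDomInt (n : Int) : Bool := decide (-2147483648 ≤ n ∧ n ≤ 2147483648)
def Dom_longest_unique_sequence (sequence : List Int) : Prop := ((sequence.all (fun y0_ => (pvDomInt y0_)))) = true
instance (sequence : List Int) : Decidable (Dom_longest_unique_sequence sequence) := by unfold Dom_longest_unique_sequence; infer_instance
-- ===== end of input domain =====

-- B replaces A's one-step window shrinks with their slice membership scans by a single
-- pass over the sequence keeping a dict of each value's last index (return value only:
-- both Pythons are generators, compared as the list of yielded slices).

-- ===== PORT A =====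
-- A's while loop: state (i, j); either shrink the window (i+1) or emit and extend (j+1).
def lusLoopA (seq : List Int) (i j : Nat) : List (List Int) :=
  if h : j < seq.length then
    if seq[j] ∈ PySem.List.slice seq (some (i : Int)) (some (j : Int)) then
      lusLoopA seq (i + 1) j
    else
      PySem.List.slice seq (some (i : Int)) (some ((j + 1 : Nat) : Int)) ::
        lusLoopA seq i (j + 1)
  else []
termination_by (seq.length - j, j - i)
decreasing_by
  · -- shrink branch: membership in seq[i:j] forces i < j
    have hij : i < j := by
      by_contra hij
      push Not at hij
      rw [PySem.List.slice_natCast, Nat.sub_eq_zero_of_le hij] at *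
      simp_all
    right
    omega
  · left; omega

def longest_unique_sequence (sequence : List Int) : List (List Int) :=
  lusLoopA sequence 0 0

-- ===== PORT B =====
-- Source B's loop body: state (i, j, last, out).
def lusStep (seq : List Int) (st : Nat × Nat × PySem.Dict Int Int × List (List Int))
    (x : Int) : Nat × Nat × PySem.Dict Int Int × List (List Int) :=
  let i := st.1
  let j := st.2.1
  let last := st.2.2.1
  let out := st.2.2.2
  let p := last.getD x (-1)
  let i' := if (i : Int) ≤ p then p.toNat + 1 else i
  let last' := last.insert x (j : Int)
  (i', j + 1, last',
    out ++ [PySem.List.slice seq (some (i' : Int)) (some ((j + 1 : Nat) : Int))])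

def longest_unique_sequence_alt (sequence : List Int) : List (List Int) :=
  (sequence.foldl (lusStep sequence) (0, 0, PySem.Dict.empty, [])).2.2.2

-- ===== PRECONDITION & SPEC =====
def Spec_longest_unique_sequence (sequence : List Int) (out : List (List Int)) : Prop := out = longest_unique_sequence_alt sequence
instance (sequence : List Int) (out : List (List Int)) : Decidable (Spec_longest_unique_sequence sequence out) := by unfold Spec_longest_unique_sequence; infer_instance

-- ===== CLAIM (what is proved, stated in full; the proofs are below) =====
def Claim_equal_longest_unique_sequence : Prop := ∀ (sequence : List Int), Dom_longest_unique_sequence sequence → Spec_longest_unique_sequence sequence (longest_unique_sequence sequence)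

-- ===== LEMMAS AND PROOFS =====

-- last index of x in seq[0:j], or -1 (what B's dict stores)
def lastD (seq : List Int) : Nat → Int → Int
  | 0, _ => -1
  | j + 1, x => if seq[j]? = some x then (j : Int) else lastD seq j x

lemma lastD_lt (seq : List Int) (j : Nat) (x : Int) : lastD seq j x < (j : Int) := by
  induction j with
  | zero => simp [lastD]
  | succ j ih =>
    simp only [lastD]
    split
    · omega
    · push_cast; omega

lemma mem_slice_iff (seq : List Int) (i j : Nat) (x : Int) (hj : j ≤ seq.length) :
    x ∈ PySem.List.slice seq (some (i : Int)) (some (j : Int)) ↔ (i : Int) ≤ lastD seq j x := by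
  induction j with
  | zero =>
    rw [PySem.List.slice_natCast]
    simp [lastD]
    omega
  | succ j ih =>
    have hj' : j < seq.length := by omega
    rw [PySem.List.slice_natCast]
    by_cases hij : i ≤ j
    · have hstep : (j + 1) - i = (j - i) + 1 := by omega
      rw [hstep, List.take_add_one]
      have hget : (seq.drop i)[j - i]? = seq[j]? := by
        rw [List.getElem?_drop]
        congr 1
        omega
      rw [hget, List.getElem?_eq_getElem hj']
      simp only [List.mem_append, Option.toList_some, List.mem_singleton]
      rw [← PySem.List.slice_natCast, ih (by omega)]
      simp only [lastD]
      by_cases hx : seq[j] = x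
      · simp [hx, List.getElem?_eq_getElem hj']
        omega
      · have : ¬ (seq[j]? = some x) := by
          rw [List.getElem?_eq_getElem hj']; simpa using hx
        simp [this]
        tauto
    · have h0 : (j + 1) - i = 0 := by omega
      rw [h0]
      simp only [List.take_zero, List.not_mem_nil, false_iff]
      have := lastD_lt seq (j + 1) x
      omega

-- characterization of one outer step of A's loop
lemma Ainner (seq : List Int) (k : Nat) : ∀ (i j : Nat), j - i ≤ k → (hj : j < seq.length) →
    lusLoopA seq i j =
      (let p := lastD seq j (seq[j]'hj)
       let i' := if (i : Int) ≤ p then p.toNat + 1 else i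
       PySem.List.slice seq (some (i' : Int)) (some ((j + 1 : Nat) : Int)) ::
         lusLoopA seq i' (j + 1)) := by
  induction k with
  | zero =>
    intro i j hk hj
    have hij : j ≤ i := by omega
    have hmem : ¬ seq[j] ∈ PySem.List.slice seq (some (i : Int)) (some (j : Int)) := by
      rw [PySem.List.slice_natCast, Nat.sub_eq_zero_of_le hij]
      simp
    have hlt : lastD seq j (seq[j]'hj) < (i : Int) := by
      have h1 := (mem_slice_iff seq i j (seq[j]'hj) (by omega)).not
      rw [not_le] at h1
      exact h1.mp hmem
    rw [lusLoopA, dif_pos hj, if_neg hmem]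
    simp only [if_neg (not_le.mpr hlt)]
  | succ k ih =>
    intro i j hk hj
    by_cases hmem : seq[j] ∈ PySem.List.slice seq (some (i : Int)) (some (j : Int))
    · have hp : (i : Int) ≤ lastD seq j (seq[j]'hj) :=
        (mem_slice_iff seq i j (seq[j]'hj) (by omega)).mp hmem
      have hplt := lastD_lt seq j (seq[j]'hj)
      have hij : i < j := by omega
      rw [lusLoopA, dif_pos hj, if_pos hmem, ih (i + 1) j (by omega) hj]
      simp only
      by_cases hp1 : ((i + 1 : Nat) : Int) ≤ lastD seq j (seq[j]'hj)
      · rw [if_pos hp1, if_pos hp]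
      · have hpe : lastD seq j (seq[j]'hj) = (i : Int) := by push_cast at hp1 ⊢; omega
        rw [if_neg hp1, if_pos hp, hpe]
        simp
    · have hlt : lastD seq j (seq[j]'hj) < (i : Int) := by
        have h1 := (mem_slice_iff seq i j (seq[j]'hj) (by omega)).not
        rw [not_le] at h1
        exact h1.mp hmem
      rw [lusLoopA, dif_pos hj, if_neg hmem]
      simp only [if_neg (not_le.mpr hlt)]

lemma mainB (seq : List Int) : ∀ (rest pre : List Int) (i : Nat) (d : PySem.Dict Int Int)
    (out : List (List Int)), seq = pre ++ rest →
    (∀ x, d.getD x (-1) = lastD seq pre.length x) →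
    (rest.foldl (lusStep seq) (i, pre.length, d, out)).2.2.2 =
      out ++ lusLoopA seq i pre.length := by
  intro rest
  induction rest with
  | nil =>
    intro pre i d out hseq hd
    have hlen : pre.length = seq.length := by rw [hseq]; simp
    rw [List.foldl_nil, lusLoopA]
    simp [hlen]
  | cons x rest' ih =>
    intro pre i d out hseq hd
    have hj : pre.length < seq.length := by rw [hseq]; simp
    have hx : seq[pre.length]? = some x := by
      rw [hseq, List.getElem?_append_right (le_refl _)]
      simp
    have hxe : seq[pre.length]'hj = x := by
      have := List.getElem?_eq_getElem hj
      rw [hx] at this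
      exact (Option.some_inj.mp this).symm
    rw [List.foldl_cons]
    have hstep : lusStep seq (i, pre.length, d, out) x =
        (let p := lastD seq pre.length x
         let i' := if (i : Int) ≤ p then p.toNat + 1 else i
         (i', pre.length + 1, d.insert x (pre.length : Int),
          out ++ [PySem.List.slice seq (some (i' : Int))
            (some ((pre.length + 1 : Nat) : Int))])) := by
      simp only [lusStep, hd x]
    rw [hstep]
    simp only
    have hlen1 : pre.length + 1 = (pre ++ [x]).length := by simp
    set p := lastD seq pre.length x with hp
    set i' := if (i : Int) ≤ p then p.toNat + 1 else i with hi'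
    rw [hlen1]
    rw [ih (pre ++ [x]) i' (d.insert x (pre.length : Int)) _
      (by rw [hseq]; simp)
      (by
        intro y
        rw [PySem.Dict.getD_insert]
        simp only [List.length_append, List.length_singleton, lastD, hx]
        by_cases hyx : y = x
        · simp [hyx]
        · have : ¬ (some x = some y) := by simpa using fun h => hyx h.symm
          simp [hyx, this, hd y])]
    rw [Ainner seq (pre.length - i) i pre.length (le_refl _) hj]
    simp only [hxe, ← hp, ← hi', ← hlen1]
    simp [List.append_assoc]

-- ===== VERDICT (by name: the statement is the Claim_ definition above) =====
theorem longest_unique_sequence_spec : Claim_equal_longest_unique_sequence := by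
  intro seq _
  unfold Spec_longest_unique_sequence longest_unique_sequence longest_unique_sequence_alt
  have h := mainB seq seq [] 0 PySem.Dict.empty [] (by simp)
    (fun x => by simp [PySem.Dict.getD_empty, lastD])
  simpa using h.symm
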